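-- pv_equiv track=rewrite | github.com/Gezraf/CollegeProjects-GuyShitrit | Semester1/TCB/Python And Cryptography/ClassWork/Answers/lab7_GuyShitrit.py | Q1b
-- ===== SOURCE A (Python) =====
-- f11 = lambda n: n % 2 == 0        # even digit?
--
-- f12 = lambda n: n % 10            # last digit
--
-- f13 = lambda n: n // 10           # drop last digit
--
-- f14 = lambda n: n * 10            # multiply by 10
--
-- f15 = lambda n, d: n + d     # append digit
--
-- def Q1b(num):
--     temp = num
--     reversed_num = 0
--
--     while temp != 0:
--         digit = f12(temp)
--         reversed_num = f15(f14(reversed_num), digit)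
--         temp = f13(temp)
--
--     res = 0
--     while reversed_num != 0:
--         digit = f12(reversed_num)
--         if f11(digit):
--             res = f15(f14(res), digit)
--         reversed_num = f13(reversed_num)
--
--     return res
-- ===== SOURCE B (Python) =====
-- def Q1b(num):
--     temp = num
--     res = 0
--     m = 1
--     while temp != 0:
--         digit = temp % 10
--         temp //= 10
--         if digit % 2 == 0:
--             res = digit * m + res
--             m *= 10
--     return res
-- ===== Notes on version B (the rewrite author's own statement) =====
-- stated objective: simpler
-- what changed: B replaces A's two passes (build a reversed integer, then rescan it filtering even digits) by one pass over num itself that keeps a place-value multiplier, prepending each newly seen even digit.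
-- intended difference: On positive multiples of 10 that contain a nonzero even digit (e.g. 20), A loses the trailing zeros while building the intermediate reversed integer and returns e.g. 2, while B returns 20, the even digits of num in their original order, which is the intended value. — e.g. on Q1b(20): A returns 2, B returns 20
import Mathlib
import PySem

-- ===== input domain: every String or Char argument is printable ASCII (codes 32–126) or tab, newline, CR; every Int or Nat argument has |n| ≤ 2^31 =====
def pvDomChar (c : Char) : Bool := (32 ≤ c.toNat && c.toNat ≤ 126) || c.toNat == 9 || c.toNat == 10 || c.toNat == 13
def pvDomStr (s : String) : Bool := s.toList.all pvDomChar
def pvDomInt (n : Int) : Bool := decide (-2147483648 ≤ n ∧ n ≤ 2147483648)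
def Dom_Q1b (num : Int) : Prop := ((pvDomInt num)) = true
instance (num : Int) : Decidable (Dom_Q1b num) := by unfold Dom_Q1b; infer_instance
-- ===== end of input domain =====

-- B drops A's reverse-then-rescan (two loops through an intermediate reversed integer) for a single
-- pass over num that keeps a place-value multiplier; on positive multiples of 10 containing a
-- nonzero even digit A's reversal loses the trailing zeros (D_ below) and B returns the intended value.
-- Equivalence is about return values; neither program mutates anything.

-- ===== PORT A =====
-- first while loop: builds the reversed integer.  'if temp ≤ 0 then …' is the loop exit
-- 'temp != 0' plus a totality guard: for temp < 0 the Python loop never terminates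
-- (Python's (-1)//10 = -1), which Pre_Q1b excludes.
def Q1b_rev (temp rev : Int) : Int :=
  if temp ≤ 0 then rev
  else Q1b_rev (PySem.Int.floordiv temp 10)
      (rev * 10 + PySem.Int.mod temp 10)            -- f15 (f14 reversed_num) digit
termination_by temp.toNat
decreasing_by
  rw [PySem.Int.floordiv_eq_ediv_of_pos (by norm_num)]
  omega

-- second while loop: keeps the even digits (same totality guard; reversed_num ≥ 0 here).
def Q1b_flt (r res : Int) : Int :=
  if r ≤ 0 then res
  else Q1b_flt (PySem.Int.floordiv r 10)
      (if PySem.Int.mod (PySem.Int.mod r 10) 2 = 0       -- f11 digit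
       then res * 10 + PySem.Int.mod r 10                -- f15 (f14 res) digit
       else res)
termination_by r.toNat
decreasing_by
  rw [PySem.Int.floordiv_eq_ediv_of_pos (by norm_num)]
  omega

def Q1b (num : Int) : Int :=
  Q1b_flt (Q1b_rev num 0) 0

-- ===== PORT B =====
-- Source B's single while loop (same loop exit / totality guard as above).
def Q1b_loop (temp res m : Int) : Int :=
  if temp ≤ 0 then res
  else
    let digit := PySem.Int.mod temp 10
    if PySem.Int.mod digit 2 = 0
    then Q1b_loop (PySem.Int.floordiv temp 10) (digit * m + res) (m * 10)
    else Q1b_loop (PySem.Int.floordiv temp 10) res m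
termination_by temp.toNat
decreasing_by
  all_goals rw [PySem.Int.floordiv_eq_ediv_of_pos (by norm_num)]
  all_goals omega

def Q1b_alt (num : Int) : Int :=
  Q1b_loop num 0 1

-- ===== PRECONDITION & SPEC =====
-- Pre_ excludes the negative numbers: there both Python loops ('while temp != 0' with
-- temp //= 10, and (-1)//10 == -1) never terminate, so A returns on exactly 0 ≤ num.
def Pre_Q1b (num : Int) : Prop := 0 ≤ num
instance (num : Int) : Decidable (Pre_Q1b num) := by unfold Pre_Q1b; infer_instance
def pvWitness_Q1b : Int := 7

-- On positive multiples of 10 that contain a nonzero even digit (e.g. 20), A loses the trailing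
-- zeros while building the intermediate reversed integer and returns e.g. 2, while B returns 20,
-- the even digits of num in their original order, which is the intended value.
def D_Q1b (num : Int) : Prop :=
  0 < num ∧ PySem.Int.mod num 10 = 0 ∧
    ∃ d ∈ Nat.digits 10 num.toNat, d % 2 = 0 ∧ d ≠ 0
instance (num : Int) : Decidable (D_Q1b num) := by unfold D_Q1b; infer_instance

def Spec_Q1b (num : Int) (out : Int) : Prop := ¬ D_Q1b num → out = Q1b_alt num
instance (num : Int) (out : Int) : Decidable (Spec_Q1b num out) := by unfold Spec_Q1b; infer_instance

def pvDiffWitness_Q1b : Int := 20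
def pvDiffWitnessOut_Q1b : Int × Int := (2, 20)

-- ===== CLAIM (what is proved, stated in full; the proofs are below) =====
def Claim_unchanged_Q1b : Prop := ∀ (num : Int), Dom_Q1b num → Pre_Q1b num → Spec_Q1b num (Q1b num)
def Claim_changed_Q1b : Prop := Dom_Q1b (pvDiffWitness_Q1b) ∧ Pre_Q1b (pvDiffWitness_Q1b) ∧ D_Q1b (pvDiffWitness_Q1b) ∧ Q1b (pvDiffWitness_Q1b) = pvDiffWitnessOut_Q1b.1 ∧ Q1b_alt (pvDiffWitness_Q1b) = pvDiffWitnessOut_Q1b.2 ∧ pvDiffWitnessOut_Q1b.1 ≠ pvDiffWitnessOut_Q1b.2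
def Claim_exact_Q1b : Prop := ∀ (num : Int), Dom_Q1b num → Pre_Q1b num → D_Q1b num → Q1b num ≠ Q1b_alt num

-- ===== LEMMAS AND PROOFS =====

-- notation: the fold both of A's loops perform on the digits they visit
def pvFold (acc : Int) (l : List Nat) : Int := l.foldl (fun a d => a * 10 + (d : Int)) acc
def pvEven (d : Nat) : Bool := d % 2 == 0
def pvZero (d : Nat) : Bool := d == 0

theorem cast10 : ((10:Nat):Int) = 10 := by norm_num

theorem rev_eq (n : Nat) : ∀ acc : Int, Q1b_rev (n : Int) acc = pvFold acc (Nat.digits 10 n) := by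
  induction n using Nat.strong_induction_on with
  | _ n ih =>
    intro acc
    rcases Nat.eq_zero_or_pos n with h0 | hpos
    · subst h0; rw [Q1b_rev]; simp [pvFold]
    · rw [Q1b_rev, if_neg (by exact_mod_cast Nat.not_le.mpr hpos)]
      rw [show (10:Int) = ((10:Nat):Int) from cast10.symm]
      rw [PySem.Int.floordiv_natCast, PySem.Int.mod_natCast]
      rw [ih (n/10) (Nat.div_lt_self hpos (by norm_num))]
      rw [Nat.digits_def' (by norm_num) hpos]
      simp [pvFold]

theorem flt_eq (n : Nat) : ∀ res : Int,
    Q1b_flt (n : Int) res = pvFold res ((Nat.digits 10 n).filter pvEven) := by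
  induction n using Nat.strong_induction_on with
  | _ n ih =>
    intro res
    rcases Nat.eq_zero_or_pos n with h0 | hpos
    · subst h0; rw [Q1b_flt]; simp [pvFold]
    · rw [Q1b_flt, if_neg (by exact_mod_cast Nat.not_le.mpr hpos)]
      rw [show (10:Int) = ((10:Nat):Int) from cast10.symm]
      rw [PySem.Int.floordiv_natCast, PySem.Int.mod_natCast]
      rw [show (2:Int) = ((2:Nat):Int) from by norm_num, PySem.Int.mod_natCast]
      rw [ih (n/10) (Nat.div_lt_self hpos (by norm_num))]
      rw [Nat.digits_def' (by norm_num) hpos, List.filter_cons]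
      by_cases he : (n % 10) % 2 = 0
      · rw [if_pos (by exact_mod_cast congrArg (Nat.cast : Nat → Int) he),
          if_pos (by rw [pvEven]; exact beq_iff_eq.mpr he)]
        rfl
      · rw [if_neg (fun h => he (by exact_mod_cast h)),
          if_neg (by rw [pvEven, beq_eq_false_iff_ne.mpr he]; exact Bool.false_ne_true)]

theorem loop_eq (n : Nat) : ∀ res m : Int,
    Q1b_loop (n : Int) res m
      = res + m * ((Nat.ofDigits 10 ((Nat.digits 10 n).filter pvEven) : Nat) : Int) := by
  induction n using Nat.strong_induction_on with
  | _ n ih =>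
    intro res m
    rcases Nat.eq_zero_or_pos n with h0 | hpos
    · subst h0; rw [Q1b_loop]; simp [Nat.ofDigits_nil]
      
    · rw [Q1b_loop, if_neg (by exact_mod_cast Nat.not_le.mpr hpos)]
      simp only []
      rw [show (10:Int) = ((10:Nat):Int) from cast10.symm]
      rw [PySem.Int.floordiv_natCast, PySem.Int.mod_natCast]
      rw [show (2:Int) = ((2:Nat):Int) from by norm_num, PySem.Int.mod_natCast]
      rw [Nat.digits_def' (by norm_num) hpos, List.filter_cons]
      by_cases he : (n % 10) % 2 = 0
      · rw [if_pos (by exact_mod_cast congrArg (Nat.cast : Nat → Int) he),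
          if_pos (by rw [pvEven]; exact beq_iff_eq.mpr he)]
        rw [ih (n/10) (Nat.div_lt_self hpos (by norm_num)), Nat.ofDigits_cons]
        push_cast
        ring
      · rw [if_neg (fun h => he (by exact_mod_cast h)),
          if_neg (by rw [pvEven, beq_eq_false_iff_ne.mpr he]; exact Bool.false_ne_true)]
        rw [ih (n/10) (Nat.div_lt_self hpos (by norm_num))]

theorem fold_eq_ofDigits (l : List Nat) : ∀ acc : Int,
    pvFold acc l = acc * 10 ^ l.length + ((Nat.ofDigits 10 l.reverse : Nat) : Int) := by
  induction l with
  | nil => intro acc; simp [pvFold, Nat.ofDigits_nil]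
  
  | cons d t ih =>
    intro acc
    rw [show pvFold acc (d :: t) = pvFold (acc * 10 + (d:Int)) t from rfl, ih,
      List.reverse_cons]
    push_cast [Nat.ofDigits_append, Nat.ofDigits_singleton, List.length_reverse, List.length_cons]
    ring

theorem ofDigits_zero_of_all_zero (l : List Nat) (h : ∀ x ∈ l, x = 0) :
    Nat.ofDigits 10 l = 0 := by
  induction l with
  | nil => simp [Nat.ofDigits_nil]
  | cons d t ih =>
    rw [Nat.ofDigits_cons, h d (by simp), ih (fun x hx => h x (by simp [hx]))]

theorem ofDigits_ne_zero (l : List Nat) (d : Nat) (hd : d ∈ l) (hdnz : d ≠ 0) :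
    Nat.ofDigits 10 l ≠ 0 := by
  induction l with
  | nil => simp at hd
  | cons a t ih =>
    rw [Nat.ofDigits_cons]
    rcases List.mem_cons.mp hd with h | h
    · subst h; omega
    · have := ih h; omega

-- digits of the reversed integer: the trailing zeros of n are gone
theorem digits_rev (n : Nat) :
    Nat.digits 10 (Nat.ofDigits 10 (Nat.digits 10 n).reverse)
      = ((Nat.digits 10 n).dropWhile pvZero).reverse := by
  have hsplit : (Nat.digits 10 n).reverse
      = ((Nat.digits 10 n).dropWhile pvZero).reverse
        ++ ((Nat.digits 10 n).takeWhile pvZero).reverse := by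
    rw [← List.reverse_append, List.takeWhile_append_dropWhile]
  have htake : Nat.ofDigits 10 ((Nat.digits 10 n).takeWhile pvZero).reverse = 0 :=
    ofDigits_zero_of_all_zero _ (fun x hx => by
      simpa [pvZero] using List.mem_takeWhile_imp (List.mem_reverse.mp hx))
  rw [hsplit, Nat.ofDigits_append, htake, Nat.mul_zero, Nat.add_zero]
  refine Nat.digits_ofDigits 10 (by norm_num) _ ?_ ?_
  · intro d hd
    exact Nat.digits_lt_base (by norm_num)
      ((List.dropWhile_sublist pvZero).mem (List.mem_reverse.mp hd))
  · intro h
    have hne : (Nat.digits 10 n).dropWhile pvZero ≠ [] := by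
      intro hc; rw [hc] at h; simp at h
    have h1 : ((Nat.digits 10 n).dropWhile pvZero).reverse.getLast h
        = ((Nat.digits 10 n).dropWhile pvZero).head hne := by
      have h2 := List.getLast?_reverse (l := (Nat.digits 10 n).dropWhile pvZero)
      rw [List.getLast?_eq_some_getLast h, List.head?_eq_some_head hne] at h2
      exact Option.some.inj h2
    rw [h1]
    have h3 := List.head_dropWhile_not pvZero hne
    simpa [pvZero] using h3

-- A's final value, through the digit list of n with trailing zeros dropped
theorem A_eq (n : Nat) :
    Q1b (n : Int)
      = ((Nat.ofDigits 10 (((Nat.digits 10 n).dropWhile pvZero).filter pvEven) : Nat) : Int) := by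
  rw [Q1b, rev_eq n 0, fold_eq_ofDigits, zero_mul, zero_add,
    flt_eq (Nat.ofDigits 10 (Nat.digits 10 n).reverse) 0,
    digits_rev, List.filter_reverse, fold_eq_ofDigits, List.reverse_reverse,
    zero_mul, zero_add]

-- B's final value
theorem B_eq (n : Nat) :
    Q1b_alt (n : Int) = ((Nat.ofDigits 10 ((Nat.digits 10 n).filter pvEven) : Nat) : Int) := by
  rw [Q1b_alt, loop_eq n 0 1, zero_add, one_mul]

-- the whole relation: B = 10^k * A with k the number of trailing zeros of n
theorem B_rel_A (n : Nat) :
    Q1b_alt (n : Int)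
      = 10 ^ ((Nat.digits 10 n).takeWhile pvZero).length * Q1b (n : Int) := by
  rw [B_eq, A_eq]
  have hfL : (Nat.digits 10 n).filter pvEven
      = (Nat.digits 10 n).takeWhile pvZero
        ++ ((Nat.digits 10 n).dropWhile pvZero).filter pvEven := by
    conv_lhs => rw [← List.takeWhile_append_dropWhile (p := pvZero) (l := Nat.digits 10 n)]
    rw [List.filter_append]
    congr 1
    refine List.filter_eq_self.mpr (fun a ha => ?_)
    have h0 : a = 0 := by simpa [pvZero] using List.mem_takeWhile_imp ha
    simp [pvEven, h0]
  rw [hfL, Nat.ofDigits_append,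
    ofDigits_zero_of_all_zero _ (fun x hx => by simpa [pvZero] using List.mem_takeWhile_imp hx)]
  push_cast
  ring

-- ===== VERDICT (by name: the statement is the Claim_ definition above) =====
theorem cast_mod (n : Nat) : PySem.Int.mod ((n : Nat) : Int) 10 = ((n % 10 : Nat) : Int) := by
  rw [show (10:Int) = ((10:Nat):Int) from cast10.symm, PySem.Int.mod_natCast]

theorem Q1b_spec : Claim_unchanged_Q1b := by
  intro num _ hpre hnd
  lift num to Nat using hpre with n
  rw [B_rel_A n]
  unfold D_Q1b at hnd
  push Not at hnd
  simp only [Int.toNat_natCast] at hnd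
  rcases Nat.eq_zero_or_pos n with h0 | hpos
  · subst h0; simp
  · by_cases hm0 : n % 10 = 0
    · have hall := hnd (by exact_mod_cast hpos) (by rw [cast_mod, hm0]; norm_num)
      have hA : Q1b ((n : Nat) : Int) = 0 := by
        rw [A_eq]
        rw [ofDigits_zero_of_all_zero _ (fun x hx => by
          obtain ⟨hxM, hxe⟩ := List.mem_filter.mp hx
          have hxL : x ∈ Nat.digits 10 n := (List.dropWhile_sublist pvZero).mem hxM
          have he : x % 2 = 0 := by simpa [pvEven] using hxe
          exact hall x hxL he)]
        norm_num
      rw [hA, mul_zero]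
    · have hL : Nat.digits 10 n = n % 10 :: Nat.digits 10 (n / 10) :=
        Nat.digits_def' (by norm_num) hpos
      have hk : (Nat.digits 10 n).takeWhile pvZero = [] := by
        rw [hL]; simp [pvZero, hm0]
      rw [hk]
      simp

theorem Q1b_changed : Claim_changed_Q1b := by
  unfold Claim_changed_Q1b
  refine ⟨by decide, by decide, by decide, ?_, ?_, by decide⟩
  · show Q1b ((20:Nat) : Int) = 2
    rw [A_eq]
    decide
  · show Q1b_alt ((20:Nat) : Int) = 20
    rw [B_eq]
    decide

theorem Q1b_tight : Claim_exact_Q1b := by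
  intro num _ hpre hd
  lift num to Nat using hpre with n
  unfold D_Q1b at hd
  simp only [Int.toNat_natCast] at hd
  obtain ⟨hpos, hm0, d, hdL, hde, hdnz⟩ := hd
  have hposn : 0 < n := by exact_mod_cast hpos
  have hm : n % 10 = 0 := by
    rw [cast_mod] at hm0; exact_mod_cast hm0
  have hL : Nat.digits 10 n = 0 :: Nat.digits 10 (n / 10) := by
    rw [Nat.digits_def' (by norm_num) hposn, hm]
  have hk : 1 ≤ ((Nat.digits 10 n).takeWhile pvZero).length := by
    rw [hL]; simp [pvZero]
  have hdM : d ∈ (Nat.digits 10 n).dropWhile pvZero := by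
    have hmem : d ∈ (Nat.digits 10 n).takeWhile pvZero ++ (Nat.digits 10 n).dropWhile pvZero := by
      rw [List.takeWhile_append_dropWhile]; exact hdL
    rcases List.mem_append.mp hmem with h | h
    · exact absurd (by simpa [pvZero] using List.mem_takeWhile_imp h) hdnz
    · exact h
  have hdF : d ∈ ((Nat.digits 10 n).dropWhile pvZero).filter pvEven :=
    List.mem_filter.mpr ⟨hdM, by simp [pvEven, hde]⟩
  have hA0 := ofDigits_ne_zero _ d hdF hdnz
  intro heq
  rw [B_rel_A n, A_eq] at heq
  have h1 : (1:Int) ≤ ((Nat.ofDigits 10 (((Nat.digits 10 n).dropWhile pvZero).filter pvEven) : Nat) : Int) := by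
    exact_mod_cast Nat.one_le_iff_ne_zero.mpr hA0
  have h2 : (10:Int) ≤ 10 ^ ((Nat.digits 10 n).takeWhile pvZero).length := by
    calc (10:Int) = 10 ^ 1 := (pow_one 10).symm
      _ ≤ _ := pow_le_pow_right₀ (by norm_num) hk
  nlinarith
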